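-- pv_equiv track=rewrite | github.com/rajveermogal/veris | app.py | _labels_for_query
-- ===== SOURCE A (Python) =====
-- from typing import Optional, Tuple, List, Dict, Any
--
-- def _labels_for_query(query: str) -> Tuple[List[str], List[str]]:
--     q = (query or "").lower()
--
--     if any(x in q for x in ["ta", "teaching assistant"]):
--         targets = ["Teaching Assistant", "TA"]
--     elif any(x in q for x in ["professor", "instructor", "teacher"]):
--         targets = ["Instructor", "Professor"]
--     elif "grader" in q:
--         targets = ["Grader"]
--     elif any(x in q for x in ["email", "e-mail"]):
--         targets = ["Email", "E-mail"]
--     elif "phone" in q: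
--         targets = ["Phone", "Telephone"]
--     elif "office hours" in q:
--         targets = ["Office Hours"]
--     elif "website" in q:
--         targets = ["Website", "Class Website", "Course Website"]
--     else:
--         targets = []
--
--     stops = [
--         "Instructor", "Professor", "Teaching Assistant", "TA", "Grader",
--         "Office", "Email", "E-mail", "Phone", "Telephone",
--         "Website", "Class Website", "Course Website",
--         "Course Administrator", "Administrator",
--         "Office Hours", "Location", "Zoom", "Canvas", "Slack"
--     ]
--
--     return targets, stops
-- ===== SOURCE B (Python) =====
-- TARGETS = [
--     ["Teaching Assistant", "TA"],
--     ["Instructor", "Professor"],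
--     ["Grader"],
--     ["Email", "E-mail"],
--     ["Phone", "Telephone"],
--     ["Office Hours"],
--     ["Website", "Class Website", "Course Website"],
-- ]
--
-- KEYWORDS = [
--     ("ta", 0), ("teaching assistant", 0),
--     ("professor", 1), ("instructor", 1), ("teacher", 1),
--     ("grader", 2),
--     ("email", 3), ("e-mail", 3),
--     ("phone", 4),
--     ("office hours", 5),
--     ("website", 6),
-- ]
--
-- STOPS = [
--     "Instructor", "Professor", "Teaching Assistant", "TA", "Grader",
--     "Office", "Email", "E-mail", "Phone", "Telephone",
--     "Website", "Class Website", "Course Website",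
--     "Course Administrator", "Administrator",
--     "Office Hours", "Location", "Zoom", "Canvas", "Slack"
-- ]
--
-- def _labels_for_query(query):
--     # Single left-to-right pass over the text: at each position record which
--     # keywords start there, keeping the smallest (highest-priority) rule index.
--     q = (query or "").lower()
--     best = len(TARGETS)  # sentinel: nothing matched yet
--     for i in range(len(q)):
--         for kw, r in KEYWORDS:
--             if r < best and q.startswith(kw, i):
--                 best = r
--     targets = TARGETS[best] if best < len(TARGETS) else []
--     return targets, STOPS
-- ===== Notes on version B (the rewrite author's own statement) =====
-- stated objective: alternative
-- what changed: A's keyword-major if/elif cascade of whole-string substring membership tests is replaced by a single text-position scan: at each index of the lowered query B checks which keywords start there (hand-rolled substring search) and keeps the minimum rule index, then selects the targets by table lookup; stops stay a constant.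
import Mathlib
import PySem

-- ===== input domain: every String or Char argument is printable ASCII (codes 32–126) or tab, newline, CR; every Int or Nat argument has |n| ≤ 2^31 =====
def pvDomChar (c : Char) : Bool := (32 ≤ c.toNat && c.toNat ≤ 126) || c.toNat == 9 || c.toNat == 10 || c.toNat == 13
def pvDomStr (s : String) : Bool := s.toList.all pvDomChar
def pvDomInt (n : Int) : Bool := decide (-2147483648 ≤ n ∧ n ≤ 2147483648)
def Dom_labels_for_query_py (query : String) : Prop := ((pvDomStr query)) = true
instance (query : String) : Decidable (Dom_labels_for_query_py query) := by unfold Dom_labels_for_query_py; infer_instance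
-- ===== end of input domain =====

-- B replaces A's keyword-major cascade of substring tests by a single text-position scan
-- collecting the minimal matching rule index (objective: alternative).

-- ===== PORT A =====
def labels_for_query_py (query : String) : List String × List String :=
  let q := PySem.Str.lower query
  let targets :=
    if ["ta", "teaching assistant"].any (fun x => PySem.Str.isIn x q) then
      ["Teaching Assistant", "TA"]
    else if ["professor", "instructor", "teacher"].any (fun x => PySem.Str.isIn x q) then
      ["Instructor", "Professor"]
    else if PySem.Str.isIn "grader" q then
      ["Grader"]
    else if ["email", "e-mail"].any (fun x => PySem.Str.isIn x q) then
      ["Email", "E-mail"]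
    else if PySem.Str.isIn "phone" q then
      ["Phone", "Telephone"]
    else if PySem.Str.isIn "office hours" q then
      ["Office Hours"]
    else if PySem.Str.isIn "website" q then
      ["Website", "Class Website", "Course Website"]
    else []
  let stops := ["Instructor", "Professor", "Teaching Assistant", "TA", "Grader",
    "Office", "Email", "E-mail", "Phone", "Telephone",
    "Website", "Class Website", "Course Website",
    "Course Administrator", "Administrator",
    "Office Hours", "Location", "Zoom", "Canvas", "Slack"]
  (targets, stops)

-- ===== PORT B =====
def pvTargets : List (List String) :=
  [ ["Teaching Assistant", "TA"],
    ["Instructor", "Professor"],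
    ["Grader"],
    ["Email", "E-mail"],
    ["Phone", "Telephone"],
    ["Office Hours"],
    ["Website", "Class Website", "Course Website"] ]

def pvKeywords : List (List Char × Nat) :=
  [ ("ta".toList, 0), ("teaching assistant".toList, 0),
    ("professor".toList, 1), ("instructor".toList, 1), ("teacher".toList, 1),
    ("grader".toList, 2),
    ("email".toList, 3), ("e-mail".toList, 3),
    ("phone".toList, 4),
    ("office hours".toList, 5),
    ("website".toList, 6) ]

def pvStops : List String :=
  ["Instructor", "Professor", "Teaching Assistant", "TA", "Grader",
   "Office", "Email", "E-mail", "Phone", "Telephone",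
   "Website", "Class Website", "Course Website",
   "Course Administrator", "Administrator",
   "Office Hours", "Location", "Zoom", "Canvas", "Slack"]

-- q.startswith(kw, i) with 0 ≤ i ≤ len(q) is exactly "kw is a prefix of q[i:]".
def labels_for_query_py_alt (query : String) : List String × List String :=
  let q := (PySem.Str.lower query).toList
  let best :=
    (List.range q.length).foldl
      (fun best i =>
        pvKeywords.foldl
          (fun best kr =>
            if kr.2 < best ∧ PySem.Chars.startswith (q.drop i) kr.1 then kr.2 else best)
          best)
      pvTargets.length
  let targets := if best < pvTargets.length then pvTargets.getD best [] else []
  (targets, pvStops)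

-- ===== PRECONDITION & SPEC =====
def Spec_labels_for_query_py (query : String) (out : List String × List String) : Prop := out = labels_for_query_py_alt query
instance (query : String) (out : List String × List String) : Decidable (Spec_labels_for_query_py query out) := by unfold Spec_labels_for_query_py; infer_instance

-- ===== CLAIM (what is proved, stated in full; the proofs are below) =====
def Claim_equal_labels_for_query_py : Prop := ∀ (query : String), Dom_labels_for_query_py query → Spec_labels_for_query_py query (labels_for_query_py query)

-- ===== LEMMAS AND PROOFS =====

-- the min-update step is a conditional `min`
theorem pv_step_eq (b r : Nat) (c : Bool) :
    (if r < b ∧ c = true then r else b) = (if c then min b r else b) := by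
  by_cases h : c = true
  · simp [h]; split_ifs <;> omega
  · simp [h]

-- the double fold computes the minimum of the seed and all matched rule indices
theorem pv_fold_min {β : Type} (l : List β) (g : β → Nat) (p : β → Bool) (b : Nat) :
    l.foldl (fun b x => if g x < b ∧ p x = true then g x else b) b =
      ((l.filter p).map g).foldl min b := by
  induction l generalizing b with
  | nil => rfl
  | cons x xs ih =>
      simp only [List.foldl_cons, List.filter_cons]
      by_cases h : p x = true
      · rw [show (if g x < b ∧ p x = true then g x else b) = min b (g x) by
          rw [pv_step_eq b (g x) (p x)]; simp [h]]
        rw [ih]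
        simp [h]
      · rw [show (if g x < b ∧ p x = true then g x else b) = b by simp [h]]
        rw [ih]
        simp [h]

theorem pv_foldl_min_le (L : List Nat) (b : Nat) : L.foldl min b ≤ b := by
  induction L generalizing b with
  | nil => simp
  | cons x xs ih => exact le_trans (ih _) (Nat.min_le_left _ _)

theorem pv_foldl_min_le_mem (L : List Nat) (b x : Nat) (hx : x ∈ L) :
    L.foldl min b ≤ x := by
  induction L generalizing b with
  | nil => cases hx
  | cons y ys ih =>
      simp only [List.foldl_cons]
      rcases List.mem_cons.mp hx with h | h
      · subst h; exact le_trans (pv_foldl_min_le _ _) (Nat.min_le_right _ _)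
      · exact ih _ h

theorem pv_foldl_min_mem (L : List Nat) (b : Nat) :
    L.foldl min b = b ∨ L.foldl min b ∈ L := by
  induction L generalizing b with
  | nil => exact Or.inl rfl
  | cons y ys ih =>
      simp only [List.foldl_cons]
      rcases ih (min b y) with h | h
      · rcases Nat.le_total b y with hby | hby
        · left; rw [h, Nat.min_eq_left hby]
        · right; rw [h, Nat.min_eq_right hby]; simp
      · right; exact List.mem_cons_of_mem _ h

-- foldl min with seed 7 over a list of values < 7 is the least member (7 if none)
theorem pv_min_cascade (L : List Nat) (hub : ∀ x ∈ L, x < 7) :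
    L.foldl min 7 =
      (if 0 ∈ L then 0 else if 1 ∈ L then 1 else if 2 ∈ L then 2 else
       if 3 ∈ L then 3 else if 4 ∈ L then 4 else if 5 ∈ L then 5 else
       if 6 ∈ L then 6 else 7) := by
  have hle := pv_foldl_min_le L 7
  have hmem := pv_foldl_min_mem L 7
  split_ifs with h0 h1 h2 h3 h4 h5 h6
  · have := pv_foldl_min_le_mem L 7 0 h0; omega
  · have := pv_foldl_min_le_mem L 7 1 h1
    rcases hmem with h | h
    · omega
    · interval_cases h' : (L.foldl min 7) <;> simp_all
  · have := pv_foldl_min_le_mem L 7 2 h2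
    rcases hmem with h | h
    · omega
    · interval_cases h' : (L.foldl min 7) <;> simp_all
  · have := pv_foldl_min_le_mem L 7 3 h3
    rcases hmem with h | h
    · omega
    · interval_cases h' : (L.foldl min 7) <;> simp_all
  · have := pv_foldl_min_le_mem L 7 4 h4
    rcases hmem with h | h
    · omega
    · interval_cases h' : (L.foldl min 7) <;> simp_all
  · have := pv_foldl_min_le_mem L 7 5 h5
    rcases hmem with h | h
    · omega
    · interval_cases h' : (L.foldl min 7) <;> simp_all
  · have := pv_foldl_min_le_mem L 7 6 h6
    rcases hmem with h | h
    · omega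
    · interval_cases h' : (L.foldl min 7) <;> simp_all
  · rcases hmem with h | h
    · exact h
    · have := hub _ h
      have := pv_foldl_min_le_mem L 7 _ h
      interval_cases h' : (L.foldl min 7) <;> simp_all

-- a nonempty keyword occurs as an infix iff it starts at some position i < length
theorem pv_match_iff (q kw : List Char) (hkw : kw ≠ []) :
    (∃ i, i ∈ List.range q.length ∧ PySem.Chars.startswith (q.drop i) kw = true) ↔
      PySem.Chars.isIn kw q = true := by
  rw [← PySem.Chars.exists_prefix_drop_iff_isIn]
  constructor
  · rintro ⟨i, _, h⟩
    exact ⟨i, (PySem.Chars.startswith_iff _ _).mp h⟩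
  · rintro ⟨j, h⟩
    by_cases hj : j < q.length
    · exact ⟨j, List.mem_range.mpr hj, (PySem.Chars.startswith_iff _ _).mpr h⟩
    · exfalso
      rw [List.drop_eq_nil_of_le (by omega)] at h
      exact hkw (List.prefix_nil.mp h)
  
theorem pv_foldl_ext {α : Type} (l : List α) (f g : Nat → α → Nat)
    (h : ∀ b x, f b x = g b x) (b : Nat) : l.foldl f b = l.foldl g b := by
  induction l generalizing b with
  | nil => rfl
  | cons x xs ih => simp only [List.foldl_cons, h, ih]

theorem pv_foldl_foldl {α : Type} (l : List α) (f : α → List Nat) (b : Nat) :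
    l.foldl (fun b i => (f i).foldl min b) b = (l.flatMap f).foldl min b := by
  induction l generalizing b with
  | nil => rfl
  | cons x xs ih => simp [List.flatMap_cons, List.foldl_append, ih]

theorem pv_keywords_nonempty : ∀ kr ∈ pvKeywords, kr.1 ≠ [] := by decide

theorem pv_mem_L_iff (q : List Char) (r : Nat) :
    (r ∈ (List.range q.length).flatMap
        (fun i => (pvKeywords.filter
            (fun kr => PySem.Chars.startswith (q.drop i) kr.1)).map Prod.snd)) ↔
      ∃ kw, (kw, r) ∈ pvKeywords ∧ PySem.Chars.isIn kw q = true := by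
  constructor
  · intro h
    obtain ⟨i, hi, hmem⟩ := List.mem_flatMap.mp h
    obtain ⟨kr, hkr, hr⟩ := List.mem_map.mp hmem
    obtain ⟨hkr', hsw⟩ := List.mem_filter.mp hkr
    refine ⟨kr.1, ?_, ?_⟩
    · subst hr; exact hkr'
    · exact (pv_match_iff q kr.1 (pv_keywords_nonempty kr hkr')).mp ⟨i, hi, hsw⟩
  · rintro ⟨kw, hkw, hin⟩
    obtain ⟨i, hi, hsw⟩ := (pv_match_iff q kw (pv_keywords_nonempty _ hkw)).mpr hin
    exact List.mem_flatMap.mpr ⟨i, hi,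
      List.mem_map.mpr ⟨(kw, r), List.mem_filter.mpr ⟨hkw, hsw⟩, rfl⟩⟩

-- selecting from the target table by the least matching index equals an if-cascade
theorem pv_sel (c0 c1 c2 c3 c4 c5 c6 : Prop)
    [Decidable c0] [Decidable c1] [Decidable c2] [Decidable c3]
    [Decidable c4] [Decidable c5] [Decidable c6] :
    (if (if c0 then 0 else if c1 then 1 else if c2 then 2 else if c3 then 3
         else if c4 then 4 else if c5 then 5 else if c6 then 6 else 7) < pvTargets.length then
       pvTargets.getD
         (if c0 then 0 else if c1 then 1 else if c2 then 2 else if c3 then 3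
          else if c4 then 4 else if c5 then 5 else if c6 then 6 else 7) []
     else []) =
    (if c0 then ["Teaching Assistant", "TA"]
     else if c1 then ["Instructor", "Professor"]
     else if c2 then ["Grader"]
     else if c3 then ["Email", "E-mail"]
     else if c4 then ["Phone", "Telephone"]
     else if c5 then ["Office Hours"]
     else if c6 then ["Website", "Class Website", "Course Website"]
     else []) := by
  by_cases h0 : c0 <;> by_cases h1 : c1 <;> by_cases h2 : c2 <;> by_cases h3 : c3 <;>
    by_cases h4 : c4 <;> by_cases h5 : c5 <;> by_cases h6 : c6 <;>
      simp [h0, h1, h2, h3, h4, h5, h6, pvTargets]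

-- ===== VERDICT (by name: the statement is the Claim_ definition above) =====
theorem labels_for_query_py_spec : Claim_equal_labels_for_query_py := by
  intro query _
  unfold Spec_labels_for_query_py labels_for_query_py labels_for_query_py_alt
  simp only [List.any_cons, List.any_nil, Bool.or_false, Bool.or_eq_true, PySem.Str.isIn_eq]
  set q : List Char := (PySem.Str.lower query).toList with hq
  set L : List Nat := (List.range q.length).flatMap
      (fun i => (pvKeywords.filter
          (fun kr => PySem.Chars.startswith (q.drop i) kr.1)).map Prod.snd) with hL
  have hfold :
      (List.range q.length).foldl
        (fun best i =>
          pvKeywords.foldl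
            (fun best kr =>
              if kr.2 < best ∧ PySem.Chars.startswith (q.drop i) kr.1 then kr.2 else best)
            best)
        pvTargets.length = L.foldl min 7 := by
    have h7 : pvTargets.length = 7 := by decide
    rw [h7, hL, ← pv_foldl_foldl]
    exact pv_foldl_ext _ _ _
      (fun b i => pv_fold_min pvKeywords Prod.snd
        (fun kr => PySem.Chars.startswith (q.drop i) kr.1) b) 7
  have hub : ∀ x ∈ L, x < 7 := by
    intro x hx
    obtain ⟨kw, hkw, _⟩ := (pv_mem_L_iff q x).mp hx
    have hall : ∀ kr ∈ pvKeywords, kr.2 < 7 := by decide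
    exact hall (kw, x) hkw
  rw [hfold, pv_min_cascade L hub, pv_sel]
  have h0 := pv_mem_L_iff q 0
  have h1 := pv_mem_L_iff q 1
  have h2 := pv_mem_L_iff q 2
  have h3 := pv_mem_L_iff q 3
  have h4 := pv_mem_L_iff q 4
  have h5 := pv_mem_L_iff q 5
  have h6 := pv_mem_L_iff q 6
  rw [← hL] at h0 h1 h2 h3 h4 h5 h6
  simp only [pvKeywords, List.mem_cons, List.not_mem_nil, Prod.mk.injEq, or_false] at h0 h1 h2 h3 h4 h5 h6
  norm_num at h0 h1 h2 h3 h4 h5 h6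
  simp only [h0, h1, h2, h3, h4, h5, h6, pvStops, ← hq]
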